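-- pv_equiv track=rewrite | github.com/stupidcomputer/demographic-manager-sanitized | enterer.py | get_attr_cata_counts
-- ===== SOURCE A (Python) =====
-- age = ["a", "c"]
--
-- gender = ["m", "f", "u/o"]
--
-- ethnicity = ["h", "nh"]
--
-- race = ["ai/an", "as", "b/aa", "nh/opi", "wh", "1+", "unk"]
--
-- def get_attr_cata_counts(sels):
--     ages = 0
--     genders = 0
--     ethnicities = 0
--     races = 0
--     for i in sels:
--         if i in age:
--             ages += 1
--         if i in gender:
--             genders += 1
--         if i in ethnicity:
--             ethnicities += 1
--         if i in race:
--             races += 1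
--
--     return (ages, genders, ethnicities, races)
-- ===== SOURCE B (Python) =====
-- age = ["a", "c"]
--
-- gender = ["m", "f", "u/o"]
--
-- ethnicity = ["h", "nh"]
--
-- race = ["ai/an", "as", "b/aa", "nh/opi", "wh", "1+", "unk"]
--
-- def get_attr_cata_counts(sels):
--     # Build a histogram of the selections once, then aggregate per category:
--     # each category's count is the sum of the occurrence counts of its members.
--     hist = {}
--     for i in sels:
--         hist[i] = hist.get(i, 0) + 1
--     def total(cat):
--         return sum(hist.get(v, 0) for v in cat)
--     return (total(age), total(gender), total(ethnicity), total(race))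
-- ===== Notes on version B (the rewrite author's own statement) =====
-- stated objective: alternative
-- what changed: Instead of classifying each selection with four per-element membership tests, B builds an occurrence histogram of the selections once and then computes each category's count by summing the histogram counts of that category's members (valid since the category lists have no duplicates).
import Mathlib
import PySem

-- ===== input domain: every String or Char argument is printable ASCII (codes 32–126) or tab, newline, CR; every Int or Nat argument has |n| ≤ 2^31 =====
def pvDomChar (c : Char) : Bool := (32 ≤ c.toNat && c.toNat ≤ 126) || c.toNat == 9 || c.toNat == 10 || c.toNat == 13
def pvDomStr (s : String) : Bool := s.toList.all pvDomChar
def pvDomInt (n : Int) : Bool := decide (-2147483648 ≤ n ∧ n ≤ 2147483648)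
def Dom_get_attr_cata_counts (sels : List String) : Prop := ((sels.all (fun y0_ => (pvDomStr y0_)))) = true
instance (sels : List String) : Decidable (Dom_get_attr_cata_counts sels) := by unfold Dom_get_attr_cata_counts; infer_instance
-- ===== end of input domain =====

-- B builds an occurrence histogram of the selections once and sums the histogram counts of each
-- category's members, instead of A's four membership tests per selection; alternative algorithm, same result.

-- ===== PORT A =====
def pvAge : List String := ["a", "c"]
def pvGender : List String := ["m", "f", "u/o"]
def pvEthnicity : List String := ["h", "nh"]
def pvRace : List String := ["ai/an", "as", "b/aa", "nh/opi", "wh", "1+", "unk"]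

def get_attr_cata_counts (sels : List String) : Int × Int × Int × Int :=
  let st := sels.foldl (fun (st : Int × Int × Int × Int) i =>
    let st := if pvAge.contains i then (st.1 + 1, st.2.1, st.2.2.1, st.2.2.2) else st
    let st := if pvGender.contains i then (st.1, st.2.1 + 1, st.2.2.1, st.2.2.2) else st
    let st := if pvEthnicity.contains i then (st.1, st.2.1, st.2.2.1 + 1, st.2.2.2) else st
    let st := if pvRace.contains i then (st.1, st.2.1, st.2.2.1, st.2.2.2 + 1) else st
    st) (0, 0, 0, 0)
  st

-- ===== PORT B =====
def get_attr_cata_counts_alt (sels : List String) : Int × Int × Int × Int :=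
  -- hist[i] = hist.get(i, 0) + 1 over sels
  let hist := sels.foldl (fun (d : PySem.Dict String Int) i =>
    PySem.Dict.insert d i (PySem.Dict.getD d i 0 + 1)) PySem.Dict.empty
  -- total(cat) = sum(hist.get(v, 0) for v in cat)
  let total := fun (cat : List String) => cat.foldl (fun s v => s + PySem.Dict.getD hist v 0) 0
  (total pvAge, total pvGender, total pvEthnicity, total pvRace)

-- ===== PRECONDITION & SPEC =====
def Spec_get_attr_cata_counts (sels : List String) (out : Int × Int × Int × Int) : Prop := out = get_attr_cata_counts_alt sels
instance (sels : List String) (out : Int × Int × Int × Int) : Decidable (Spec_get_attr_cata_counts sels out) := by unfold Spec_get_attr_cata_counts; infer_instance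

-- ===== CLAIM =====
def Claim_equal_get_attr_cata_counts : Prop := ∀ (sels : List String), Dom_get_attr_cata_counts sels → Spec_get_attr_cata_counts sels (get_attr_cata_counts sels)

-- ===== LEMMAS AND PROOFS =====

def pvStepA (st : Int × Int × Int × Int) (i : String) : Int × Int × Int × Int :=
  let st := if pvAge.contains i then (st.1 + 1, st.2.1, st.2.2.1, st.2.2.2) else st
  let st := if pvGender.contains i then (st.1, st.2.1 + 1, st.2.2.1, st.2.2.2) else st
  let st := if pvEthnicity.contains i then (st.1, st.2.1, st.2.2.1 + 1, st.2.2.2) else st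
  let st := if pvRace.contains i then (st.1, st.2.1, st.2.2.1, st.2.2.2 + 1) else st
  st

-- A's fold counts, per component, the occurrences of each category member
theorem pvFoldA_eq (sels : List String) (a b c d : Int) :
    sels.foldl pvStepA (a, b, c, d) =
      (a + sels.count "a" + sels.count "c",
       b + sels.count "m" + sels.count "f" + sels.count "u/o",
       c + sels.count "h" + sels.count "nh",
       d + sels.count "ai/an" + sels.count "as" + sels.count "b/aa" + sels.count "nh/opi"
         + sels.count "wh" + sels.count "1+" + sels.count "unk") := by
  induction sels generalizing a b c d with
  | nil => simp
  | cons x xs ih =>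
      have hp := ih (pvStepA (a, b, c, d) x).1 (pvStepA (a, b, c, d) x).2.1
        (pvStepA (a, b, c, d) x).2.2.1 (pvStepA (a, b, c, d) x).2.2.2
      simp only [Prod.mk.eta] at hp
      rw [List.foldl_cons, hp]
      by_cases hx : x ∈ (["a","c","m","f","u/o","h","nh","ai/an","as","b/aa","nh/opi","wh","1+","unk"] : List String)
      · simp only [List.mem_cons, List.not_mem_nil, or_false] at hx
        rcases hx with rfl|rfl|rfl|rfl|rfl|rfl|rfl|rfl|rfl|rfl|rfl|rfl|rfl|rfl <;>
          simp [pvStepA, pvAge, pvGender, pvEthnicity, pvRace, Prod.ext_iff] <;> omega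
      · simp only [List.mem_cons, List.not_mem_nil, or_false, not_or] at hx
        obtain ⟨n1, n2, n3, n4, n5, n6, n7, n8, n9, n10, n11, n12, n13, n14⟩ := hx
        simp [pvStepA, pvAge, pvGender, pvEthnicity, pvRace,
          n1, n2, n3, n4, n5, n6, n7, n8, n9, n10, n11, n12, n13, n14]

-- ===== VERDICT =====
theorem get_attr_cata_counts_spec : Claim_equal_get_attr_cata_counts := by
  intro sels _
  show get_attr_cata_counts sels = get_attr_cata_counts_alt sels
  unfold get_attr_cata_counts get_attr_cata_counts_alt
  rw [show (fun (st : Int × Int × Int × Int) i =>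
      let st := if pvAge.contains i then (st.1 + 1, st.2.1, st.2.2.1, st.2.2.2) else st
      let st := if pvGender.contains i then (st.1, st.2.1 + 1, st.2.2.1, st.2.2.2) else st
      let st := if pvEthnicity.contains i then (st.1, st.2.1, st.2.2.1 + 1, st.2.2.2) else st
      let st := if pvRace.contains i then (st.1, st.2.1, st.2.2.1, st.2.2.2 + 1) else st
      st) = pvStepA from rfl, pvFoldA_eq,
    PySem.Dict.foldl_insert_getD_add_one_eq_counter]
  simp [pvAge, pvGender, pvEthnicity, pvRace, PySem.Dict.getD_counter]
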